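-- pv_equiv track=rewrite | github.com/Pkeji/Game-Map-Tracker | route_manager.py | _is_valid_fs_name
-- ===== SOURCE A (Python) =====
-- _INVALID_FILE_NAME_CHARS = set('<>:"/\\|?*')
--
-- def _is_valid_fs_name(name: str) -> bool:
--     if not name or name in {".", ".."}:
--         return False
--     if any(char in name for char in _INVALID_FILE_NAME_CHARS):
--         return False
--     if name.endswith((" ", ".")):
--         return False
--     return True
-- ===== SOURCE B (Python) =====
-- _INVALID = '<>:"/\\|?*'
--
--
-- def _is_valid_fs_name(name: str) -> bool:
--     # One-pass scan (a tiny DFA for the pattern [^bad]*[^bad .]): reject on any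
--     # invalid character; 'ok' tracks whether the most recent character may end
--     # the name.  Empty names, '.' and '..' fall out since they end in no char
--     # or in '.'.
--     ok = False
--     for ch in name:
--         if ch in _INVALID:
--             return False
--         ok = ch != ' ' and ch != '.'
--     return ok
-- ===== Notes on version B (the rewrite author's own statement) =====
-- stated objective: alternative
-- what changed: B replaces A's three staged whole-string checks (empty/'.'/'..' guard, a scan per invalid character, endswith) by one left-to-right pass that runs a tiny DFA: reject on an invalid character, and carry a boolean saying whether the character just read may legally end the name.
import Mathlib
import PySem

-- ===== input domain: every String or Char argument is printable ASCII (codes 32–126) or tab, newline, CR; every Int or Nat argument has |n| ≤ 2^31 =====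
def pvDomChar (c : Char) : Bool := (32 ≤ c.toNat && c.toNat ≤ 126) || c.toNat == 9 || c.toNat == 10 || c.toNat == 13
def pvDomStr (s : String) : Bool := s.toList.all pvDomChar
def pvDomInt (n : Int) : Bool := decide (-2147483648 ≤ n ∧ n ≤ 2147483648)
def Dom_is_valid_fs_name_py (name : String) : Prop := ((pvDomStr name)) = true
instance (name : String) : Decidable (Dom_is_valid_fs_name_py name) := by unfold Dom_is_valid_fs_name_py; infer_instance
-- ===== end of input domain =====

-- B replaces A's three staged whole-string checks (empty/"."/".." guard, one scan per invalid
-- character, endswith) by a single left-to-right pass running a tiny DFA: reject on an invalid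
-- character, carry a boolean saying whether the last character read may end the name. Objective: alternative.


-- ===== PORT A =====
-- _INVALID_FILE_NAME_CHARS = set('<>:"/\\|?*')  (a Python set of chars; 'any' is order-independent)
def pvInvalidChars : List Char := ['<', '>', ':', '"', '/', '\\', '|', '?', '*']

def is_valid_fs_name_py (name : String) : Bool :=
  if name = "" || name = "." || name = ".." then false
  else if pvInvalidChars.any (fun c => PySem.Str.isIn (String.ofList [c]) name) then false
  else if PySem.Str.endswith name " " || PySem.Str.endswith name "." then false
  else true

-- ===== PORT B =====
-- _INVALID = '<>:"/\\|?*'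
def pvBad : List Char := ['<', '>', ':', '"', '/', '\\', '|', '?', '*']

-- the for-loop of Source B: state 'ok', early 'return False' on an invalid character
def pvAltLoop : List Char → Bool → Bool
  | [], ok => ok
  | c :: rest, _ => if pvBad.contains c then false
                    else pvAltLoop rest (!(c == ' ') && !(c == '.'))

def is_valid_fs_name_py_alt (name : String) : Bool :=
  pvAltLoop name.toList false

-- ===== PRECONDITION & SPEC =====
def Spec_is_valid_fs_name_py (name : String) (out : Bool) : Prop := out = is_valid_fs_name_py_alt name
instance (name : String) (out : Bool) : Decidable (Spec_is_valid_fs_name_py name out) := by unfold Spec_is_valid_fs_name_py; infer_instance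

-- ===== CLAIM (what is proved, stated in full; the proofs are below) =====
def Claim_equal_is_valid_fs_name_py : Prop := ∀ (name : String), Dom_is_valid_fs_name_py name → Spec_is_valid_fs_name_py name (is_valid_fs_name_py name)

-- ===== LEMMAS AND PROOFS =====

-- 'c in name' for a single char is list membership
theorem pv_isIn_single (c : Char) (l : List Char) :
    PySem.Str.isIn (String.ofList [c]) (String.ofList l) = l.contains c := by
  rw [Bool.eq_iff_iff, PySem.Str.isIn_iff_infix]
  simp [List.singleton_infix_iff]

-- endswith on a nonempty string looks only at the last character
theorem pv_endswith_single (l' : List Char) (a x : Char) :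
    PySem.Str.endswith (String.ofList (l' ++ [a])) (String.ofList [x]) = (a == x) := by
  rw [Bool.eq_iff_iff]
  simp [PySem.Chars.endswith_iff]
  constructor
  · rintro ⟨t, ht⟩
    have := congrArg List.getLast? ht
    simp at this
    exact this.symm
  · rintro rfl; exact ⟨l', rfl⟩

-- the DFA pass on a nonempty list: all characters clean, and the last one may end the name
theorem pv_altLoop_concat (l' : List Char) (a : Char) (ok : Bool) :
    pvAltLoop (l' ++ [a]) ok =
      ((l' ++ [a]).all (fun c => !pvBad.contains c) && (!(a == ' ') && !(a == '.'))) := by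
  induction l' generalizing ok with
  | nil => by_cases h : pvBad.contains a <;> simp [pvAltLoop]
  | cons c rest ih =>
      simp only [List.cons_append, pvAltLoop, List.all_cons]
      by_cases h : pvBad.contains c <;> simp [ih, Bool.and_assoc]

set_option maxHeartbeats 1000000 in
theorem pv_main (l' : List Char) (a : Char) :
    is_valid_fs_name_py (String.ofList (l' ++ [a]))
      = is_valid_fs_name_py_alt (String.ofList (l' ++ [a])) := by
  have hsp : PySem.Str.endswith (String.ofList (l' ++ [a])) " " = (a == ' ') :=
    pv_endswith_single l' a ' '
  have hdt : PySem.Str.endswith (String.ofList (l' ++ [a])) "." = (a == '.') :=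
    pv_endswith_single l' a '.'
  unfold is_valid_fs_name_py is_valid_fs_name_py_alt
  rw [hsp, hdt]
  simp only [String.toList_ofList]
  rw [pv_altLoop_concat]
  by_cases hne : String.ofList (l' ++ [a]) = "" ∨ String.ofList (l' ++ [a]) = "." ∨
      String.ofList (l' ++ [a]) = ".."
  · -- the name is "", "." or ".."; then it ends in '.', so B is false too
    have ha : a = '.' := by
      rcases hne with h | h | h <;> simp [String.ext_iff] at h <;>
        · have := congrArg List.getLast? h
          simp at this
          exact this
    subst ha
    rcases hne with h | h | h <;> simp [h]
  · push Not at hne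
    simp only [hne.1, hne.2.1, hne.2.2, Bool.or_self, decide_false]
    rw [show (pvInvalidChars.any fun c => PySem.Str.isIn (String.ofList [c]) (String.ofList (l' ++ [a]))) =
        (pvInvalidChars.any fun c => (l' ++ [a]).contains c) from by
      apply List.any_congr rfl; intro c; exact pv_isIn_single c (l' ++ [a])]
    rw [Bool.eq_iff_iff]
    simp [pvBad, pvInvalidChars]
    intro _ _
    constructor
    · rintro ⟨c1, c2, c3, c4, c5, c6, c7, c8, c9⟩
      exact ⟨fun x hx => ⟨fun e => c1.1 (e ▸ hx), fun e => c2.1 (e ▸ hx), fun e => c3.1 (e ▸ hx),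
          fun e => c4.1 (e ▸ hx), fun e => c5.1 (e ▸ hx), fun e => c6.1 (e ▸ hx),
          fun e => c7.1 (e ▸ hx), fun e => c8.1 (e ▸ hx), fun e => c9.1 (e ▸ hx)⟩,
        fun e => c1.2 e.symm, fun e => c2.2 e.symm, fun e => c3.2 e.symm,
        fun e => c4.2 e.symm, fun e => c5.2 e.symm, fun e => c6.2 e.symm,
        fun e => c7.2 e.symm, fun e => c8.2 e.symm, fun e => c9.2 e.symm⟩
    · rintro ⟨hall, a1, a2, a3, a4, a5, a6, a7, a8, a9⟩
      exact ⟨⟨fun hm => ((hall _ hm).1) rfl, fun e => a1 e.symm⟩,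
        ⟨fun hm => ((hall _ hm).2.1) rfl, fun e => a2 e.symm⟩,
        ⟨fun hm => ((hall _ hm).2.2.1) rfl, fun e => a3 e.symm⟩,
        ⟨fun hm => ((hall _ hm).2.2.2.1) rfl, fun e => a4 e.symm⟩,
        ⟨fun hm => ((hall _ hm).2.2.2.2.1) rfl, fun e => a5 e.symm⟩,
        ⟨fun hm => ((hall _ hm).2.2.2.2.2.1) rfl, fun e => a6 e.symm⟩,
        ⟨fun hm => ((hall _ hm).2.2.2.2.2.2.1) rfl, fun e => a7 e.symm⟩,
        ⟨fun hm => ((hall _ hm).2.2.2.2.2.2.2.1) rfl, fun e => a8 e.symm⟩,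
        ⟨fun hm => ((hall _ hm).2.2.2.2.2.2.2.2) rfl, fun e => a9 e.symm⟩⟩

-- ===== VERDICT (by name: the statement is the Claim_ definition above) =====
theorem is_valid_fs_name_py_spec : Claim_equal_is_valid_fs_name_py := by
  intro name _
  unfold Spec_is_valid_fs_name_py
  have hname : name = String.ofList name.toList := by simp
  rcases List.eq_nil_or_concat name.toList with h | ⟨l', a, h⟩
  · rw [hname, h]; decide
  · rw [List.concat_eq_append] at h
    rw [hname, h]; exact pv_main l' a
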